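-- pv_equiv track=rewrite | github.com/MrBrantCode/unitest_baseline | mut_generate/mist_train_cf/cf_81393/solution.py | count_char_freq
-- ===== SOURCE A (Python) =====
-- def count_char_freq(str):
--     # Define the vowels list
--     vowels = ['a', 'e', 'i', 'o', 'u']
--
--     # Initialize the dictionary with vowels and consonants
--     freq_dict = {'vowels': 0, 'consonants': 0}
--
--     for char in str:
--         # Check if the character is a letter
--         if char.isalpha():
--             # Convert to lowercase
--             char = char.lower()
--
--             # Update the frequency count
--             if char in freq_dict:
--                 freq_dict[char] += 1
--             else:
--                 freq_dict[char] = 1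
--
--             # Update the vowels and consonants count
--             if char in vowels:
--                 freq_dict['vowels'] += 1
--             else:
--                 freq_dict['consonants'] += 1
--
--     # Return the frequency dictionary
--     return freq_dict
-- ===== SOURCE B (Python) =====
-- def count_char_freq(str):
--     # One pass to collect lowercase letters, then per-distinct-letter counting
--     # and two summary totals computed arithmetically.
--     letters = [c.lower() for c in str if c.isalpha()]
--     freq = {k: letters.count(k) for k in dict.fromkeys(letters)}
--     v = sum(letters.count(k) for k in 'aeiou')
--     return {'vowels': v, 'consonants': len(letters) - v, **freq}
-- ===== Notes on version B (the rewrite author's own statement) =====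
-- stated objective: simpler
-- what changed: Replaces A's single stateful dict loop (conditional insert/update plus running vowel/consonant counters per character) by a filter-and-lowercase pass, a per-distinct-letter counting map built over an ordered dedup, and the vowel total as a 5-term sum with consonants = len - vowels.
import Mathlib
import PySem

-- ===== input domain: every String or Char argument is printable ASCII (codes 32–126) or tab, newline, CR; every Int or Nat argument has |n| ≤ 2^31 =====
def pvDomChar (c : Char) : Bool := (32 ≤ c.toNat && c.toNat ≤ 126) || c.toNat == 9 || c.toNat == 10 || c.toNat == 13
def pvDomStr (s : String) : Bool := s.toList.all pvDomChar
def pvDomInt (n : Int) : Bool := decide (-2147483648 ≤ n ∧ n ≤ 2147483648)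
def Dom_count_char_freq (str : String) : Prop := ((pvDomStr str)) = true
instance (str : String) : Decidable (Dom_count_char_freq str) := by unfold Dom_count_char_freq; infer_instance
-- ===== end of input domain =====

-- B replaces A's single stateful dict loop by a filter-and-lower pass, a per-distinct-letter
-- counting map, and an arithmetic vowel/consonant summary (objective: simpler decomposition).

-- ===== PORT A =====
def pvA_vowels : List String := ["a", "e", "i", "o", "u"]

-- the loop body of A for one alphabetic character (already lowercased, as a 1-char string)
def pvA_upd (d : PySem.Dict String Int) (c : String) : PySem.Dict String Int :=
  let d1 := if d.contains c then d.insert c (d.getD c 0 + 1) else d.insert c 1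
  if c ∈ pvA_vowels then d1.insert "vowels" (d1.getD "vowels" 0 + 1)
  else d1.insert "consonants" (d1.getD "consonants" 0 + 1)

def count_char_freq (str : String) : List (String × Int) :=
  (str.toList.foldl
    (fun d ch =>
      if PySem.Chars.isalpha ch then pvA_upd d (String.ofList [PySem.Chars.lowerChar ch])
      else d)
    (PySem.Dict.ofList [("vowels", 0), ("consonants", 0)])).items

-- ===== PORT B =====
def count_char_freq_alt (str : String) : List (String × Int) :=
  let letters := (str.toList.filter (fun c => PySem.Chars.isalpha c)).map
      (fun c => String.ofList [PySem.Chars.lowerChar c])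
  let freq := (PySem.List.dedup letters).map (fun k => (k, (letters.count k : Int)))
  let v : Int := ("aeiou".toList.map (fun k => (letters.count (String.ofList [k]) : Int))).sum
  ("vowels", v) :: ("consonants", (letters.length : Int) - v) :: freq

-- ===== PRECONDITION & SPEC =====
def Spec_count_char_freq (str : String) (out : List (String × Int)) : Prop := out = count_char_freq_alt str
instance (str : String) (out : List (String × Int)) : Decidable (Spec_count_char_freq str out) := by unfold Spec_count_char_freq; infer_instance

-- ===== CLAIM (what is proved, stated in full; the proofs are below) =====
def Claim_equal_count_char_freq : Prop := ∀ (str : String), Dom_count_char_freq str → Spec_count_char_freq str (count_char_freq str)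

-- ===== LEMMAS AND PROOFS =====

-- a 1-character string is neither of A's two summary keys
theorem pvOne_ne_vowels (x : Char) : String.ofList [x] ≠ "vowels" := by
  intro h; have := congrArg String.toList h; simp at this

theorem pvOne_ne_consonants (x : Char) : String.ofList [x] ≠ "consonants" := by
  intro h; have := congrArg String.toList h; simp at this

-- A's 'if char in freq_dict … else …' is one overwrite-or-append insert
theorem pvA_upd_eq (d : PySem.Dict String Int) (c : String) :
    pvA_upd d c =
      (if c ∈ pvA_vowels
        then ((d.insert c (d.getD c 0 + 1)).insert "vowels"
               ((d.insert c (d.getD c 0 + 1)).getD "vowels" 0 + 1))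
        else ((d.insert c (d.getD c 0 + 1)).insert "consonants"
               ((d.insert c (d.getD c 0 + 1)).getD "consonants" 0 + 1))) := by
  unfold pvA_upd
  split_ifs with hc hv hv <;> try rfl
  all_goals rw [PySem.Dict.getD_of_not_contains d 0 (by simpa using hc)]; norm_num

-- getD of A's letter loop at "vowels"
theorem pvFold_getD_vowels (l : List String) (hl : ∀ s ∈ l, s ≠ "vowels" ∧ s ≠ "consonants")
    (d : PySem.Dict String Int) :
    (l.foldl pvA_upd d).getD "vowels" 0
      = d.getD "vowels" 0 + (l.countP (fun s => decide (s ∈ pvA_vowels)) : Int) := by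
  induction l generalizing d with
  | nil => simp
  | cons s t ih =>
    obtain ⟨hs1, hs2⟩ := hl s List.mem_cons_self
    have hs1' : ¬("vowels" = s) := fun h => hs1 h.symm
    have hs2' : ¬("consonants" = s) := fun h => hs2 h.symm
    rw [List.foldl_cons, ih (fun x hx => hl x (List.mem_cons_of_mem _ hx)), pvA_upd_eq]
    split_ifs with hv <;>
      simp [PySem.Dict.getD_insert, hs1', hs2', hv] <;> omega

-- getD of A's letter loop at "consonants"
theorem pvFold_getD_consonants (l : List String) (hl : ∀ s ∈ l, s ≠ "vowels" ∧ s ≠ "consonants")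
    (d : PySem.Dict String Int) :
    (l.foldl pvA_upd d).getD "consonants" 0
      = d.getD "consonants" 0 + (l.countP (fun s => !decide (s ∈ pvA_vowels)) : Int) := by
  induction l generalizing d with
  | nil => simp
  | cons s t ih =>
    obtain ⟨hs1, hs2⟩ := hl s List.mem_cons_self
    have hs1' : ¬("vowels" = s) := fun h => hs1 h.symm
    have hs2' : ¬("consonants" = s) := fun h => hs2 h.symm
    rw [List.foldl_cons, ih (fun x hx => hl x (List.mem_cons_of_mem _ hx)), pvA_upd_eq]
    split_ifs with hv <;>
      simp [PySem.Dict.getD_insert, hs1', hs2', hv] <;> omega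

-- getD of A's letter loop at a non-summary key
theorem pvFold_getD_letter (l : List String) (hl : ∀ s ∈ l, s ≠ "vowels" ∧ s ≠ "consonants")
    (d : PySem.Dict String Int) (k : String) (h1 : k ≠ "vowels") (h2 : k ≠ "consonants") :
    (l.foldl pvA_upd d).getD k 0 = d.getD k 0 + (l.count k : Int) := by
  induction l generalizing d with
  | nil => simp
  | cons s t ih =>
    obtain ⟨hs1, hs2⟩ := hl s List.mem_cons_self
    rw [List.foldl_cons, ih (fun x hx => hl x (List.mem_cons_of_mem _ hx)), pvA_upd_eq]
    split_ifs with hv <;> by_cases hk : k = s <;>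
      simp [PySem.Dict.getD_insert, h1, h2, hs1, hs2, hk, ne_comm] <;> omega

-- keys of A's letter loop: the summary keys stay, letters are added set-wise
theorem pvFold_keys (l : List String) (hl : ∀ s ∈ l, s ≠ "vowels" ∧ s ≠ "consonants")
    (d : PySem.Dict String Int) (hv : "vowels" ∈ d.keys) (hc : "consonants" ∈ d.keys) :
    (l.foldl pvA_upd d).keys = PySem.Set.update d.keys l := by
  induction l generalizing d with
  | nil => rfl
  | cons s t ih =>
    rw [List.foldl_cons, pvA_upd_eq]
    have hkeys : ∀ (v : Int) (K : String), K ∈ (d.insert s v).keys →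
        ((d.insert s v).insert K ((d.insert s v).getD K 0 + 1)).keys = (d.insert s v).keys := by
      intro v K hK
      exact PySem.Dict.keys_insert_of_contains _ _ ((PySem.Dict.contains_iff_mem_keys _ _).mpr hK)
    have hmemv : ∀ v : Int, "vowels" ∈ (d.insert s v).keys := by
      intro v
      by_cases h : d.contains s
      · rw [PySem.Dict.keys_insert_of_contains _ _ h]; exact hv
      · rw [PySem.Dict.keys_insert_of_not_contains _ _ (by simpa using h)]
        exact List.mem_append_left _ hv
    have hmemc : ∀ v : Int, "consonants" ∈ (d.insert s v).keys := by
      intro v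
      by_cases h : d.contains s
      · rw [PySem.Dict.keys_insert_of_contains _ _ h]; exact hc
      · rw [PySem.Dict.keys_insert_of_not_contains _ _ (by simpa using h)]
        exact List.mem_append_left _ hc
    have hins : ∀ v : Int, (d.insert s v).keys = PySem.Set.add d.keys s := by
      intro v
      by_cases h : d.contains s
      · rw [PySem.Dict.keys_insert_of_contains _ _ h]
        have hm : s ∈ d.keys := (PySem.Dict.contains_iff_mem_keys _ _).mp h
        simp [PySem.Set.add, hm]
      · have h' : d.contains s = false := by simpa using h
        rw [PySem.Dict.keys_insert_of_not_contains _ _ h']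
        have hm : s ∉ d.keys := fun hmem => by
          simp [(PySem.Dict.contains_iff_mem_keys d s).mpr hmem] at h'
        simp [PySem.Set.add, hm]
    have step : ∀ dd : PySem.Dict String Int,
        dd.keys = PySem.Set.add d.keys s → "vowels" ∈ dd.keys → "consonants" ∈ dd.keys →
        (t.foldl pvA_upd dd).keys = PySem.Set.update d.keys (s :: t) := by
      intro dd hk hvv hcc
      rw [ih (fun x hx => hl x (List.mem_cons_of_mem _ hx)) dd hvv hcc, hk]
      rfl
    split_ifs with hvow
    · exact step _ (by rw [hkeys _ _ (hmemv _), hins]) (by rw [hkeys _ _ (hmemv _)]; exact hmemv _)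
        (by rw [hkeys _ _ (hmemv _)]; exact hmemc _)
    · exact step _ (by rw [hkeys _ _ (hmemc _), hins]) (by rw [hkeys _ _ (hmemc _)]; exact hmemv _)
        (by rw [hkeys _ _ (hmemc _)]; exact hmemc _)

-- Set.update over a prefix of keys no element of l hits
theorem pvUpdate_append (p q : List String) (l : List String) (h : ∀ x ∈ l, x ∉ p) :
    PySem.Set.update (p ++ q) l = p ++ PySem.Set.update q l := by
  induction l generalizing q with
  | nil => rfl
  | cons s t ih =>
    have hsp : s ∉ p := h s List.mem_cons_self
    have hadd : PySem.Set.add (p ++ q) s = p ++ PySem.Set.add q s := by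
      by_cases hq : s ∈ q <;>
        simp [PySem.Set.add, hq, hsp, List.append_assoc]
    show PySem.Set.update (PySem.Set.add (p ++ q) s) t = _
    rw [hadd]
    exact ih (PySem.Set.add q s) (fun x hx => h x (List.mem_cons_of_mem _ hx))

-- the vowel total as the 5-term sum B computes
theorem pvVowelSum (l : List String) :
    (l.countP (fun s => decide (s ∈ pvA_vowels)) : Int)
      = (["a", "e", "i", "o", "u"].map (fun k => (l.count k : Int))).sum := by
  induction l with
  | nil => simp
  | cons s t ih =>
    simp only [List.countP_cons, List.count_cons, List.map, List.sum_cons] at *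
    by_cases ha : s = "a" <;> by_cases he : s = "e" <;> by_cases hi : s = "i" <;>
      by_cases ho : s = "o" <;> by_cases hu : s = "u" <;>
      simp_all [pvA_vowels] <;> omega

-- ===== VERDICT (by name: the statement is the Claim_ definition above) =====
theorem count_char_freq_spec : Claim_equal_count_char_freq := by
  intro str _
  unfold Spec_count_char_freq count_char_freq count_char_freq_alt
  set letters := (str.toList.filter (fun c => PySem.Chars.isalpha c)).map
      (fun c => String.ofList [PySem.Chars.lowerChar c]) with hlet
  have hl : ∀ s ∈ letters, s ≠ "vowels" ∧ s ≠ "consonants" := by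
    intro s hs
    rw [hlet] at hs
    obtain ⟨c, _, rfl⟩ := List.mem_map.mp hs
    exact ⟨pvOne_ne_vowels _, pvOne_ne_consonants _⟩
  set d0 : PySem.Dict String Int := PySem.Dict.ofList [("vowels", 0), ("consonants", 0)] with hd0
  have hfold :
      str.toList.foldl
        (fun d ch =>
          if PySem.Chars.isalpha ch then pvA_upd d (String.ofList [PySem.Chars.lowerChar ch])
          else d) d0
      = letters.foldl pvA_upd d0 := by
    rw [PySem.List.foldl_if_eq_foldl_filter (p := fun c => PySem.Chars.isalpha c)
      (f := fun d ch => pvA_upd d (String.ofList [PySem.Chars.lowerChar ch])), hlet,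
      List.foldl_map]
  rw [hfold]
  have hkeys : (letters.foldl pvA_upd d0).keys
      = "vowels" :: "consonants" :: PySem.Set.ofList letters := by
    rw [pvFold_keys letters hl d0 (by decide) (by decide)]
    have h2 : d0.keys = ["vowels", "consonants"] ++ [] := rfl
    rw [h2, pvUpdate_append ["vowels", "consonants"] [] letters
      (by intro x hx; simpa using hl x hx)]
    rfl
  have hnodup : (letters.foldl pvA_upd d0).keys.Nodup := by
    rw [hkeys]
    refine List.nodup_cons.mpr ⟨?_, List.nodup_cons.mpr ⟨?_, PySem.Set.nodup_ofList _⟩⟩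
    · intro h
      rcases List.mem_cons.mp h with h | h
      · exact absurd h (by decide)
      · exact (hl _ ((PySem.Set.mem_ofList _ _).mp h)).1 rfl
    · intro h
      exact (hl _ ((PySem.Set.mem_ofList _ _).mp h)).2 rfl
  rw [PySem.Dict.items_eq_map_keys _ hnodup 0, hkeys]
  simp only [List.map_cons]
  -- B's five-term sum over the characters of "aeiou", as a sum over 1-char string literals
  have hb : ("aeiou".toList.map (fun k => (letters.count (String.ofList [k]) : Int))).sum
      = (["a", "e", "i", "o", "u"].map (fun k => (letters.count k : Int))).sum := rfl
  have hv : (letters.foldl pvA_upd d0).getD "vowels" 0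
      = ("aeiou".toList.map (fun k => (letters.count (String.ofList [k]) : Int))).sum := by
    rw [pvFold_getD_vowels letters hl d0, pvVowelSum, hb]
    have h0 : d0.getD "vowels" 0 = (0 : Int) := rfl
    rw [h0]; ring
  have hc : (letters.foldl pvA_upd d0).getD "consonants" 0
      = (letters.length : Int)
        - ("aeiou".toList.map (fun k => (letters.count (String.ofList [k]) : Int))).sum := by
    rw [pvFold_getD_consonants letters hl d0, hb, ← pvVowelSum]
    have h0 : d0.getD "consonants" 0 = (0 : Int) := rfl
    have hlen := List.length_eq_countP_add_countP (fun s => decide (s ∈ pvA_vowels)) (l := letters)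
    have hnot : letters.countP (fun s => !decide (s ∈ pvA_vowels))
        = letters.countP (fun a => decide ¬(decide (a ∈ pvA_vowels) = true)) := by
      apply List.countP_congr; intro x _; simp
    rw [h0, hnot]
    push_cast [hlen]
    ring
  rw [hv, hc]
  congr 1
  congr 1
  have hded : PySem.List.dedup letters = PySem.Set.ofList letters := rfl
  rw [hded]
  apply List.map_congr_left
  intro k hk
  have hkl := (PySem.Set.mem_ofList _ _).mp hk
  have hkne := hl k hkl
  rw [pvFold_getD_letter letters hl d0 k hkne.1 hkne.2]
  have h0 : d0.getD k 0 = 0 :=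
    PySem.Dict.getD_of_not_contains _ _ (by
      rw [hd0, show PySem.Dict.ofList [("vowels", (0 : Int)), ("consonants", 0)]
        = PySem.Dict.mk [("vowels", (0 : Int)), ("consonants", 0)] from rfl]
      simp
      exact ⟨fun h' => hkne.1 h'.symm, fun h' => hkne.2 h'.symm⟩)
  rw [h0]
  simp
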